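-- pv_equiv track=rewrite | github.com/envirosolutionspl/pobieracz_danych_gugik | utils.py | onlyNewest
-- ===== SOURCE A (Python) =====
-- def onlyNewest(data_file_list):
--     """filtruje listę tylko do najnowszych plików według arkuszy"""
--     updated_dict = {}
--     for data_file in data_file_list:
--         godlo = data_file.get('godlo')
--         aktualnosc = data_file.get('aktualnosc')
--         if godlo not in updated_dict or aktualnosc > updated_dict[godlo].get('aktualnosc'):
--             updated_dict[godlo] = data_file
--     return list(updated_dict.values())
-- ===== SOURCE B (Python) =====
-- def onlyNewest(data_file_list):
--     """filtruje liste tylko do najnowszych plikow wedlug arkuszy (group-then-reduce)"""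
--     groups = {}
--     for data_file in data_file_list:
--         groups.setdefault(data_file.get('godlo'), []).append(data_file)
--     return [max(group, key=lambda f: f.get('aktualnosc'))
--             for group in groups.values()]
-- ===== Notes on version B (the rewrite author's own statement) =====
-- stated objective: alternative
-- what changed: Replaces A's single interleaved keep-the-newest update pass with a two-phase group-then-reduce: first a dict grouping entries by 'godlo' in first-appearance order, then each group reduced to its first maximal element by 'aktualnosc' via max().
import Mathlib
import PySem

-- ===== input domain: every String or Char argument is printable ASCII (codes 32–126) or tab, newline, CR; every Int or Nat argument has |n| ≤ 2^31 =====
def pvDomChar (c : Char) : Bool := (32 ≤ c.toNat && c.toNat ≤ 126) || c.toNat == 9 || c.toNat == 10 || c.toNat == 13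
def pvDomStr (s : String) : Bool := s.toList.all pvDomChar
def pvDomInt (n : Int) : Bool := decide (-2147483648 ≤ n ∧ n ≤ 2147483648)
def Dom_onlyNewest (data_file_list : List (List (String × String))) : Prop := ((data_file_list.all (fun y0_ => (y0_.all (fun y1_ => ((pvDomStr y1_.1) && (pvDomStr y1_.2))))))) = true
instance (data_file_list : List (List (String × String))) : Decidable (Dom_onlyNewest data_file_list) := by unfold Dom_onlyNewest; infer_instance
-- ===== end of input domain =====

-- B replaces A's interleaved keep-the-newest pass with a group-by-'godlo'-then-reduce-with-max
-- two-phase structure (same cost, objective: alternative); return values proved equal on Pre_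
-- (the inputs on which Python A does not raise a TypeError).

-- shared helper: data_file.get(k) on an association-list dict (first match)
-- shared helper pvGtOpt: Python's 'x > y' on the two .get('aktualnosc') results. Both some: string
-- comparison (code-point lexicographic = Lean's String '<'). A none operand makes Python raise
-- TypeError; those inputs are excluded by Pre_onlyNewest, the remaining branches are arbitrary
-- totalisers (never reached under Pre_).

def pvGet (f : List (String × String)) (k : String) : Option String :=
  (PySem.Dict.mk f).get? k
def pvGtOpt (a b : Option String) : Bool :=
  match a, b with
  | some a', some b' => decide (b' < a')
  | some _, none => true
  | none, _ => false

-- ===== PORT A =====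
-- literal transliteration of A: one pass over the list, per godlo keep the entry whose
-- aktualnosc is strictly greater than the stored one (loop body as a named step function)
def pvStepA (updated_dict : PySem.Dict (Option String) (List (String × String)))
    (data_file : List (String × String)) : PySem.Dict (Option String) (List (String × String)) :=
  let godlo := pvGet data_file "godlo"
  let aktualnosc := pvGet data_file "aktualnosc"
  match updated_dict.get? godlo with
  | none => updated_dict.insert godlo data_file
  | some prev =>
      if pvGtOpt aktualnosc (pvGet prev "aktualnosc")
      then updated_dict.insert godlo data_file
      else updated_dict

def onlyNewest (data_file_list : List (List (String × String))) : List (List (String × String)) :=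
  (data_file_list.foldl pvStepA PySem.Dict.empty).values

-- ===== PORT B =====
-- B-side helper: max(group, key=lambda f: f.get('aktualnosc')) — Python max keeps the FIRST
-- maximal element; max([]) would raise in Python, groups are never empty, [] is a totaliser
def pvMaxByAkt : List (List (String × String)) → List (String × String)
  | [] => []
  | x :: xs =>
      xs.foldl (fun best f => if pvGtOpt (pvGet f "aktualnosc") (pvGet best "aktualnosc") then f else best) x

-- setdefault(f.get('godlo'), []).append(f), as a named step function
def pvStepB (groups : PySem.Dict (Option String) (List (List (String × String))))
    (data_file : List (String × String)) : PySem.Dict (Option String) (List (List (String × String))) :=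
  groups.modify (pvGet data_file "godlo") [] (· ++ [data_file])

def onlyNewest_alt (data_file_list : List (List (String × String))) : List (List (String × String)) :=
  ((data_file_list.foldl pvStepB PySem.Dict.empty).values).map pvMaxByAkt


-- ===== PRECONDITION & SPEC =====
-- Pre_ excludes exactly the inputs on which Python A raises a TypeError: two entries with the same
-- 'godlo' value one of which lacks the 'aktualnosc' key make A (and B) compare a str with None.
def Pre_onlyNewest (data_file_list : List (List (String × String))) : Prop :=
  data_file_list.Pairwise (fun f g =>
    pvGet f "godlo" = pvGet g "godlo" →
      (pvGet f "aktualnosc").isSome = true ∧ (pvGet g "aktualnosc").isSome = true)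
instance (data_file_list : List (List (String × String))) : Decidable (Pre_onlyNewest data_file_list) := by
  unfold Pre_onlyNewest; infer_instance
def pvWitness_onlyNewest : (List (List (String × String))) :=
  [[("godlo", "a"), ("aktualnosc", "1")], [("godlo", "a"), ("aktualnosc", "2")], [("godlo", "b")]]

def Spec_onlyNewest (data_file_list : List (List (String × String))) (out : List (List (String × String))) : Prop := out = onlyNewest_alt data_file_list
instance (data_file_list : List (List (String × String))) (out : List (List (String × String))) : Decidable (Spec_onlyNewest data_file_list out) := by unfold Spec_onlyNewest; infer_instance

-- ===== CLAIM (what is proved, stated in full; the proofs are below) =====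
def Claim_equal_onlyNewest : Prop := ∀ (data_file_list : List (List (String × String))), Dom_onlyNewest data_file_list → Pre_onlyNewest data_file_list → Spec_onlyNewest data_file_list (onlyNewest data_file_list)

-- ===== LEMMAS AND PROOFS =====

-- proof helpers (used only below)
def pvF (p : Option String × List (List (String × String))) : Option String × List (String × String) :=
  (p.1, pvMaxByAkt p.2)

lemma pvMax_append (x f : List (String × String)) (xs : List (List (String × String))) :
    pvMaxByAkt (x :: (xs ++ [f])) =
      if pvGtOpt (pvGet f "aktualnosc") (pvGet (pvMaxByAkt (x :: xs)) "aktualnosc") then f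
      else pvMaxByAkt (x :: xs) := by
  simp [pvMaxByAkt, List.foldl_append]

lemma pvUniq {G : PySem.Dict (Option String) (List (List (String × String)))}
    (hnd : G.keys.Nodup) {g : Option String} {grp : List (List (String × String))}
    (hg : G.get? g = some grp) {p : Option String × List (List (String × String))}
    (hp : p ∈ G.items) (hpg : p.1 = g) : p = (g, grp) := by
  have h1 : G.get? p.1 = some p.2 := PySem.Dict.get?_of_mem_items G hp hnd
  rw [hpg, hg] at h1
  cases p; cases h1; simp_all

lemma pvMain (l : List (List (String × String))) :
    ((l.foldl pvStepA PySem.Dict.empty).items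
        = (l.foldl pvStepB PySem.Dict.empty).items.map pvF)
    ∧ (∀ p ∈ (l.foldl pvStepB PySem.Dict.empty).items, p.2 ≠ [])
    ∧ (l.foldl pvStepB PySem.Dict.empty).keys.Nodup := by
  induction l using List.reverseRecOn with
  | nil => refine ⟨rfl, by simp [PySem.Dict.empty], by simp [PySem.Dict.empty]⟩
  | append_singleton l f ih =>
    obtain ⟨hitems, hne, hnd⟩ := ih
    set d := l.foldl pvStepA PySem.Dict.empty with hd
    set G := l.foldl pvStepB PySem.Dict.empty with hG
    rw [List.foldl_append, List.foldl_append]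
    simp only [List.foldl_cons, List.foldl_nil, ← hd, ← hG]
    set g := pvGet f "godlo" with hg
    -- keys agree
    have hkeys : d.keys = G.keys := by
      show d.items.map (·.1) = G.items.map (·.1)
      rw [hitems, List.map_map]; rfl
    have hcont : d.contains g = G.contains g := by
      rw [PySem.Dict.contains_eq_decide_mem_keys, PySem.Dict.contains_eq_decide_mem_keys, hkeys]
    by_cases hc : G.contains g = true
    · -- existing group
      obtain ⟨grp, hgrp⟩ : ∃ grp, G.get? g = some grp := by
        have := PySem.Dict.contains_eq_isSome_get? G g
        rw [hc] at this
        exact Option.isSome_iff_exists.mp this.symm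
      have hgrpne : grp ≠ [] := hne _ (PySem.Dict.mem_items_of_get?_eq_some G hgrp)
      obtain ⟨x, xs, rfl⟩ : ∃ x xs, grp = x :: xs := by
        cases grp with
        | nil => exact absurd rfl hgrpne
        | cons a b => exact ⟨a, b, rfl⟩
      have hdnd : d.keys.Nodup := by rw [hkeys]; exact hnd
      have hdget : d.get? g = some (pvMaxByAkt (x :: xs)) := by
        apply PySem.Dict.get?_of_mem_items d _ hdnd
        rw [hitems]
        exact List.mem_map_of_mem (PySem.Dict.mem_items_of_get?_eq_some G hgrp)
      have hdc : d.contains g = true := by rw [hcont]; exact hc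
      have hB : pvStepB G f = G.insert g ((x :: xs) ++ [f]) := by
        unfold pvStepB
        rw [← hg]
        unfold PySem.Dict.modify
        rw [PySem.Dict.getD_of_get?_eq_some G [] hgrp]
      have hBitems : (pvStepB G f).items
          = G.items.map (fun p => if (p.1 == g) = true then (g, (x :: xs) ++ [f]) else p) := by
        rw [hB, PySem.Dict.items_insert_of_contains G _ hc]
      unfold pvStepA
      simp only [← hg, hdget]
      constructor
      · by_cases hgt : pvGtOpt (pvGet f "aktualnosc") (pvGet (pvMaxByAkt (x :: xs)) "aktualnosc") = true
        · simp only [hgt, if_true]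
          rw [PySem.Dict.items_insert_of_contains d _ hdc, hBitems, hitems,
            List.map_map, List.map_map]
          apply List.map_congr_left
          intro p hp
          by_cases hpg : (p.1 == g) = true
          · simp [Function.comp, pvF, hpg, pvMax_append, hgt]
          · simp [Function.comp, pvF, hpg]
        · rw [Bool.not_eq_true] at hgt
          simp only [hgt, Bool.false_eq_true, if_false]
          rw [hBitems, List.map_map, hitems]
          apply List.map_congr_left
          intro p hp
          by_cases hpg : (p.1 == g) = true
          · have hpeq : p = (g, x :: xs) := pvUniq hnd hgrp hp (by simpa using hpg)
            subst hpeq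
            simp [Function.comp, pvF, pvMax_append, hgt]
          · simp [Function.comp, pvF, hpg]
      constructor
      · intro p hp
        rw [hBitems] at hp
        obtain ⟨q, hq, rfl⟩ := List.mem_map.mp hp
        by_cases hpg : (q.1 == g) = true <;> simp [hpg]
        exact hne q hq
      · rw [hB]
        show ((G.insert g ((x :: xs) ++ [f])).items.map (·.1)).Nodup
        rw [PySem.Dict.items_insert_of_contains G _ hc, List.map_map]
        have : (List.map ((·.1) ∘ fun p => if (p.1 == g) = true then (g, (x :: xs) ++ [f]) else p) G.items)
            = G.items.map (·.1) := by
          apply List.map_congr_left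
          intro p hp
          by_cases hpg : (p.1 == g) = true
          · have hp1 : p.1 = g := by simpa using hpg
            simp [Function.comp, hp1]
          · simp [Function.comp, hpg]
        rw [this]; exact hnd
    · -- new group
      have hc' : G.contains g = false := by simpa using hc
      have hdc : d.contains g = false := by rw [hcont]; exact hc'
      have hdget : d.get? g = none := by
        have := PySem.Dict.contains_eq_isSome_get? d g
        rw [hdc] at this
        simpa using this.symm
      have hB : pvStepB G f = G.insert g [f] := by
        unfold pvStepB
        rw [← hg]
        unfold PySem.Dict.modify
        rw [PySem.Dict.getD_of_not_contains G [] hc']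
        rfl
      unfold pvStepA
      simp only [← hg, hdget]
      refine ⟨?_, ?_, ?_⟩
      · rw [PySem.Dict.items_insert_of_not_contains d _ hdc, hB,
          PySem.Dict.items_insert_of_not_contains G _ hc', List.map_append, hitems]
        rfl
      · intro p hp
        rw [hB, PySem.Dict.items_insert_of_not_contains G _ hc'] at hp
        rcases List.mem_append.mp hp with h | h
        · exact hne p h
        · simp at h; subst h; simp
      · rw [hB]
        show (((G.insert g [f]).items.map (·.1)).Nodup)
        rw [PySem.Dict.items_insert_of_not_contains G _ hc', List.map_append]
        have hgk : g ∉ G.keys := by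
          rw [← PySem.Dict.contains_iff_mem_keys]
          simp [hc']
        have hgk2 : g ∉ G.items.map (·.1) := hgk
        simp only [List.nodup_append]
        refine ⟨hnd, by simp, ?_⟩
        intro a ha b hb
        have hb' : b = g := by simpa using hb
        subst hb'
        intro h; subst h; exact hgk2 ha

theorem pvEq (l : List (List (String × String))) : onlyNewest l = onlyNewest_alt l := by
  unfold onlyNewest onlyNewest_alt
  have h := (pvMain l).1
  show (l.foldl pvStepA PySem.Dict.empty).items.map (·.2)
      = ((l.foldl pvStepB PySem.Dict.empty).items.map (·.2)).map pvMaxByAkt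
  rw [h, List.map_map, List.map_map]
  rfl

-- ===== VERDICT (by name: the statement is the Claim_ definition above) =====
theorem onlyNewest_spec : Claim_equal_onlyNewest := by
  intro data_file_list _hdom _hpre
  unfold Spec_onlyNewest
  exact pvEq data_file_list
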